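-- pv_equiv track=rewrite | github.com/012e/scrape-thpt | scripts/apply_score.py | efficient_task_split
-- ===== SOURCE A (Python) =====
-- def efficient_task_split(start, end, con):
--     pack_count = (end - start + 1) // con
--     remaining = (end - start + 1) % con
--     share = [pack_count + 1 if i < remaining else pack_count for i in range(con)]
--
--     split = [[0, 0] for _ in range(con)]
--     current_index = start
--     for i in range(con):
--         split[i][0] = current_index
--         split[i][1] = current_index + share[i] - 1
--         current_index += share[i]
--
--     return split
-- ===== SOURCE B (Python) =====
-- def efficient_task_split(start, end, con):
--     n = end - start + 1
--     q, r = divmod(n, con)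
--     return [[start + i * q + min(i, r),
--              start + (i + 1) * q + min(i + 1, r) - 1]
--             for i in range(con)]
-- ===== Notes on version B (the rewrite author's own statement) =====
-- stated objective: simpler
-- what changed: Drops the share table and the running current_index accumulator: each block's boundaries are computed independently from its index by the closed form start + i*q + min(i, r).
import Mathlib
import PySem

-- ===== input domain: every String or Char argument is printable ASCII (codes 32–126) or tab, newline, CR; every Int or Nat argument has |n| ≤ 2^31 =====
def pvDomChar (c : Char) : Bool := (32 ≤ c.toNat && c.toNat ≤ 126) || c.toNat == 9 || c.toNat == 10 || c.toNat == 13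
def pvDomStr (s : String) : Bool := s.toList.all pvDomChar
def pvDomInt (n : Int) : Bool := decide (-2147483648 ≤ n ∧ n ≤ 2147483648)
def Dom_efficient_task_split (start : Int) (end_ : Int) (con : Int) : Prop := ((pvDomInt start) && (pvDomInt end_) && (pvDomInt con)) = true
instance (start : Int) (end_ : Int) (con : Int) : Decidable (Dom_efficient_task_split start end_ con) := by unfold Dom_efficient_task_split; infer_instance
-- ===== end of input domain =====

-- B replaces A's share table and running current_index accumulator by a closed-form
-- per-index computation of each block's boundaries (objective: simpler).


-- ===== PORT A =====
-- Transliteration of A: build the share table, then loop over range(con) carrying the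
-- growing split list and current_index (the preallocated [[0,0]]*con filled in-place in
-- Python becomes appending the completed [lo, hi] pair at index i).
def efficient_task_split (start : Int) (end_ : Int) (con : Int) : List (List Int) :=
  let pack_count := PySem.Int.floordiv (end_ - start + 1) con
  let remaining := PySem.Int.mod (end_ - start + 1) con
  let share := (PySem.List.pyRange 0 con 1).map
    (fun i => if i < remaining then pack_count + 1 else pack_count)
  let res := (PySem.List.pyRange 0 con 1).foldl
    (fun (st : List (List Int) × Int) i =>
      let s := PySem.List.pyGetD share i 0   -- share[i]; i ∈ range(con) is always in range
      (st.1 ++ [[st.2, st.2 + s - 1]], st.2 + s))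
    ([], start)
  res.1

-- ===== PORT B =====
def efficient_task_split_alt (start : Int) (end_ : Int) (con : Int) : List (List Int) :=
  let n := end_ - start + 1
  let q := PySem.Int.floordiv n con
  let r := PySem.Int.mod n con
  (PySem.List.pyRange 0 con 1).map
    (fun i => [start + i * q + min i r, start + (i + 1) * q + min (i + 1) r - 1])

-- ===== PRECONDITION & SPEC =====
-- con = 0 makes both Pythons raise ZeroDivisionError; everything else is admitted.
def Pre_efficient_task_split (start : Int) (end_ : Int) (con : Int) : Prop := con ≠ 0
instance (start : Int) (end_ : Int) (con : Int) : Decidable (Pre_efficient_task_split start end_ con) := by unfold Pre_efficient_task_split; infer_instance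
def pvWitness_efficient_task_split : Int × Int × Int := (1, 10, 3)

def Spec_efficient_task_split (start : Int) (end_ : Int) (con : Int) (out : List (List Int)) : Prop := out = efficient_task_split_alt start end_ con
instance (start : Int) (end_ : Int) (con : Int) (out : List (List Int)) : Decidable (Spec_efficient_task_split start end_ con out) := by unfold Spec_efficient_task_split; infer_instance

-- ===== CLAIM (what is proved, stated in full; the proofs are below) =====
def Claim_equal_efficient_task_split : Prop := ∀ (start : Int) (end_ : Int) (con : Int), Dom_efficient_task_split start end_ con → Pre_efficient_task_split start end_ con → Spec_efficient_task_split start end_ con (efficient_task_split start end_ con)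

-- ===== LEMMAS AND PROOFS =====

-- Loop invariant for A's accumulator: after k iterations the built list equals B's first k
-- blocks and current_index equals start + k*q + min k r.
theorem ets_loop_inv (start con q r : Int) (hr0 : 0 ≤ r) (hrc : r < con)
    (k : Nat) (hk : (k : Int) ≤ con) :
    (PySem.List.pyRange 0 (k : Int) 1).foldl
      (fun (st : List (List Int) × Int) i =>
        let s := PySem.List.pyGetD
          ((PySem.List.pyRange 0 con 1).map (fun j => if j < r then q + 1 else q)) i 0
        (st.1 ++ [[st.2, st.2 + s - 1]], st.2 + s))
      ([], start)
    = ((PySem.List.pyRange 0 (k : Int) 1).map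
        (fun i => [start + i * q + min i r, start + (i + 1) * q + min (i + 1) r - 1]),
       start + k * q + min (k : Int) r) := by
  induction k with
  | zero =>
    simp [PySem.List.pyRange_one_eq_nil]
    omega
  | succ k ih =>
    have hk' : (k : Int) ≤ con := by push_cast at hk ⊢; omega
    have hsplit : PySem.List.pyRange 0 ((k : Int) + 1) 1
        = PySem.List.pyRange 0 (k : Int) 1 ++ [(k : Int)] := by
      rw [PySem.List.pyRange_one_succ_right (by positivity)]
    push_cast
    rw [hsplit, List.foldl_append, List.map_append, ih hk']
    have hget : PySem.List.pyGetD
        ((PySem.List.pyRange 0 con 1).map (fun j => if j < r then q + 1 else q)) (k : Int) 0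
        = (if (k : Int) < r then q + 1 else q) := by
      exact PySem.List.pyGetD_map_pyRange_of_nonneg _ con (k : Int) 0 (by positivity)
        (by push_cast at hk; omega)
    simp only [List.foldl_cons, List.foldl_nil, List.map_cons, List.map_nil, hget]
    have hq : ((k : Int) + 1) * q = (k : Int) * q + q := by ring
    refine Prod.ext ?_ ?_ <;>
      · simp only
        by_cases h : (k : Int) < r <;> simp [h] <;> omega

theorem efficient_task_split_eq (start end_ con : Int) (hcon : con ≠ 0) :
    efficient_task_split start end_ con = efficient_task_split_alt start end_ con := by
  unfold efficient_task_split efficient_task_split_alt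
  rcases lt_trichotomy con 0 with hneg | hz | hpos
  · rw [PySem.List.pyRange_one_eq_nil (by omega)]
    simp
  · exact absurd hz hcon
  · have hr0 := PySem.Int.mod_nonneg (end_ - start + 1) hpos
    have hrc := PySem.Int.mod_lt (end_ - start + 1) hpos
    have hcast : ((con.toNat : Int)) = con := Int.toNat_of_nonneg (le_of_lt hpos)
    have := ets_loop_inv start con (PySem.Int.floordiv (end_ - start + 1) con)
      (PySem.Int.mod (end_ - start + 1) con) hr0 hrc con.toNat (by omega)
    rw [hcast] at this
    simp only [this]

-- ===== VERDICT (by name: the statement is the Claim_ definition above) =====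
theorem efficient_task_split_spec : Claim_equal_efficient_task_split := by
  intro start end_ con _ hpre
  unfold Spec_efficient_task_split
  exact efficient_task_split_eq start end_ con hpre
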